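-- pv_equiv track=rewrite | github.com/Fabian-17/python | ejercicios.py | ordenar_y_contar
-- ===== SOURCE A (Python) =====
-- def ordenar_y_contar(lista):
--     frecuencia = {}
--     for elemento in lista:
--         if elemento in frecuencia:
--             frecuencia[elemento] += 1
--         else:
--             frecuencia[elemento] = 1
--
--     elementos_unicos = sorted(frecuencia.keys())
--     cantidad_por_elemento = [frecuencia[elemento] for elemento in elementos_unicos]
--
--     return elementos_unicos, cantidad_por_elemento
-- ===== SOURCE B (Python) =====
-- def ordenar_y_contar(lista):
--     claves = []
--     cuentas = []
--     for x in sorted(lista):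
--         if claves and claves[-1] == x:
--             cuentas[-1] += 1
--         else:
--             claves.append(x)
--             cuentas.append(1)
--     return claves, cuentas
-- ===== Notes on version B (the rewrite author's own statement) =====
-- stated objective: faster
-- what changed: B sorts the whole list first and counts runs of equal consecutive elements in one grouped pass, instead of building a hash-map counter in a Python-level loop and then sorting its keys.
import Mathlib
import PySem

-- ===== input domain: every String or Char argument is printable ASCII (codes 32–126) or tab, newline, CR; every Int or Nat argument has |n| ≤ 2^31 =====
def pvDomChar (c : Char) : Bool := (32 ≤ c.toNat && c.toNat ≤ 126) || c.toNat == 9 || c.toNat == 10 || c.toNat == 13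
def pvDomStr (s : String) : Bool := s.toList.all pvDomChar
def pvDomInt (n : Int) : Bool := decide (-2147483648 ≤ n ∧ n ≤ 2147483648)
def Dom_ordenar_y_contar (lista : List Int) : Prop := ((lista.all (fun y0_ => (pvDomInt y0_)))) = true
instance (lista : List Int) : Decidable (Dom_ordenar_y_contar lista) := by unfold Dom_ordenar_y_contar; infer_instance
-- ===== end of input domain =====

-- B counts by a single grouped pass over the sorted copy of the input instead of A's hash-map counter; same return value.

-- ===== PORT A =====
def ordenar_y_contar (lista : List Int) : List Int × List Int :=
  let frecuencia := lista.foldl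
    (fun d elemento =>
      if d.contains elemento then d.insert elemento (d.getD elemento 0 + 1)
      else d.insert elemento 1)
    PySem.Dict.empty
  let elementos_unicos := PySem.List.sorted frecuencia.keys (fun x => x) false
  (elementos_unicos, elementos_unicos.map (fun elemento => frecuencia.getD elemento 0))

-- ===== PORT B =====
-- one loop step of Source B: 'claves[-1]' is getLast?, 'cuentas[-1] += 1' rewrites the last element
def altStep (st : List Int × List Int) (x : Int) : List Int × List Int :=
  if st.1 ≠ [] ∧ st.1.getLast? = some x
  then (st.1, st.2.dropLast ++ [st.2.getLastD 0 + 1])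
  else (st.1 ++ [x], st.2 ++ [1])

def ordenar_y_contar_alt (lista : List Int) : List Int × List Int :=
  (PySem.List.sorted lista (fun x => x) false).foldl altStep ([], [])

-- ===== PRECONDITION & SPEC =====
def Spec_ordenar_y_contar (lista : List Int) (out : List Int × List Int) : Prop := out = ordenar_y_contar_alt lista
instance (lista : List Int) (out : List Int × List Int) : Decidable (Spec_ordenar_y_contar lista out) := by unfold Spec_ordenar_y_contar; infer_instance

-- ===== CLAIM (what is proved, stated in full; the proofs are below) =====
def Claim_equal_ordenar_y_contar : Prop := ∀ (lista : List Int), Dom_ordenar_y_contar lista → Spec_ordenar_y_contar lista (ordenar_y_contar lista)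

-- ===== LEMMAS AND PROOFS =====

-- keys emitted by B's grouped pass, starting inside a run of the value k
def adjL : Int → List Int → List Int
  | k, [] => [k]
  | k, x :: xs => if x = k then adjL k xs else k :: adjL x xs

-- counts emitted by B's grouped pass, the current run of k having length c so far
def cntL : Int → Int → List Int → List Int
  | _, c, [] => [c]
  | k, c, x :: xs => if x = k then cntL k (c + 1) xs else c :: cntL x 1 xs

lemma foldl_altStep (s : List Int) : ∀ (ks cs : List Int) (k c : Int),
    List.foldl altStep (ks ++ [k], cs ++ [c]) s = (ks ++ adjL k s, cs ++ cntL k c s) := by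
  induction s with
  | nil => intro ks cs k c; simp [adjL, cntL]
  | cons a s ih =>
    intro ks cs k c
    by_cases hak : a = k
    · subst hak
      have : altStep (ks ++ [a], cs ++ [c]) a = (ks ++ [a], cs ++ [c + 1]) := by
        simp [altStep]
      rw [List.foldl_cons, this, ih ks cs a (c + 1)]
      simp [adjL, cntL]
    · have : altStep (ks ++ [k], cs ++ [c]) a = ((ks ++ [k]) ++ [a], (cs ++ [c]) ++ [1]) := by
        have hka : k ≠ a := Ne.symm hak
        simp [altStep, hka]
      simp only [List.foldl_cons, this, ih (ks ++ [k]) (cs ++ [c]) a 1]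
      simp [adjL, cntL, hak]

lemma adjL_spec (s : List Int) : ∀ (x c : Int), (x :: s).Pairwise (· ≤ ·) →
    (∀ z, z ∈ adjL x s ↔ z ∈ x :: s) ∧ (adjL x s).Pairwise (· < ·) ∧
      cntL x c s = (adjL x s).map (fun e => ((x :: s).count e : Int) + (if e = x then c - 1 else 0)) := by
  induction s with
  | nil =>
    intro x c _
    refine ⟨by simp [adjL], by simp [adjL], ?_⟩
    simp [adjL, cntL, List.count_cons]
  | cons a s ih =>
    intro x c hpw
    have hxa : x ≤ a := (List.pairwise_cons.mp hpw).1 a (by simp)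
    have htl : (a :: s).Pairwise (· ≤ ·) := (List.pairwise_cons.mp hpw).2
    by_cases hax : a = x
    · subst hax
      have hpw' : (a :: s).Pairwise (· ≤ ·) := htl
      obtain ⟨hmem, hlt, hcnt⟩ := ih a (c + 1) hpw'
      refine ⟨?_, ?_, ?_⟩
      · intro z
        rw [show adjL a (a :: s) = adjL a s from by simp [adjL], hmem z]
        simp
      · simpa [adjL] using hlt
      · simp only [adjL, cntL, if_pos rfl]
        rw [hcnt]
        apply List.map_congr_left
        intro e he
        by_cases hex : e = a
        · subst hex; simp [List.count_cons]
        · simp [List.count_cons, hex, Ne.symm hex]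
    · have hxa' : x < a := lt_of_le_of_ne hxa (fun h => hax h.symm)
      have hall : ∀ z ∈ a :: s, x < z := by
        intro z hz
        rcases List.mem_cons.mp hz with h | h
        · omega
        · exact lt_of_lt_of_le hxa' ((List.pairwise_cons.mp htl).1 z h)
      obtain ⟨hmem, hlt, hcnt⟩ := ih a 1 htl
      have hxnot : x ∉ a :: s := fun h => lt_irrefl x (hall x h)
      refine ⟨?_, ?_, ?_⟩
      · intro z
        simp only [adjL, if_neg hax]
        rw [List.mem_cons, hmem z]
        simp [List.mem_cons]
      · simp only [adjL, if_neg hax]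
        refine List.pairwise_cons.mpr ⟨?_, hlt⟩
        intro z hz; exact hall z ((hmem z).mp hz)
      · simp only [adjL, cntL, if_neg hax]
        rw [hcnt]
        have hcx : (a :: s).count x = 0 := List.count_eq_zero.mpr hxnot
        simp only [List.map_cons]
        congr 1
        · simp [List.count_cons, hcx]
        · apply List.map_congr_left
          intro e he
          have hea : e ∈ a :: s := (hmem e).mp he
          have hex : e ≠ x := fun h => lt_irrefl x (h ▸ hall e hea)
          have hxe : ¬x = e := fun h => hex h.symm
          simp [List.count_cons, hex, hxe]

lemma A_char (lista : List Int) :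
    ordenar_y_contar lista =
      (PySem.List.sorted (PySem.Set.ofList lista) (fun x => x) false,
       (PySem.List.sorted (PySem.Set.ofList lista) (fun x => x) false).map
         (fun e => ((lista.count e : Int)))) := by
  unfold ordenar_y_contar
  have hstep : (fun (d : PySem.Dict Int Int) elemento =>
      if d.contains elemento then d.insert elemento (d.getD elemento 0 + 1)
      else d.insert elemento 1)
      = (fun (d : PySem.Dict Int Int) elemento => d.insert elemento (d.getD elemento 0 + 1)) := by
    funext d e
    by_cases h : d.contains e
    · simp [h]
    · have h' : d.contains e = false := by simpa using h
      simp [h', PySem.Dict.getD_of_not_contains d 0 h']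
  rw [hstep, PySem.Dict.foldl_insert_getD_add_one_eq_counter]
  show (PySem.List.sorted (PySem.Dict.counter lista).keys (fun x => x) false,
      (PySem.List.sorted (PySem.Dict.counter lista).keys (fun x => x) false).map
        (fun elemento => (PySem.Dict.counter lista).getD elemento 0)) = _
  rw [PySem.Dict.keys_counter]
  refine Prod.ext rfl ?_
  apply List.map_congr_left
  intro e _
  exact PySem.Dict.getD_counter lista e

-- ===== VERDICT (by name: the statement is the Claim_ definition above) =====
theorem ordenar_y_contar_spec : Claim_equal_ordenar_y_contar := by
  intro lista _
  unfold Spec_ordenar_y_contar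
  rw [A_char]
  unfold ordenar_y_contar_alt
  cases hs : PySem.List.sorted lista (fun x => x) false with
  | nil =>
    have : lista = [] := (PySem.List.sorted_eq_nil_iff lista _ false).mp hs
    subst this
    decide
  | cons x s =>
    have hpw : (x :: s).Pairwise (· ≤ ·) := by
      have h2 := PySem.List.sorted_pairwise lista (fun x => x)
      rw [hs] at h2
      exact h2
    obtain ⟨hmem, hlt, hcnt⟩ := adjL_spec s x 1 hpw
    have hfirst : altStep ([], []) x = ([] ++ [x], [] ++ [1]) := by simp [altStep]
    have hB : List.foldl altStep ([], []) (x :: s) = (adjL x s, cntL x 1 s) := by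
      rw [List.foldl_cons, hfirst, foldl_altStep]
      simp
    rw [hB]
    have hperm : (adjL x s).Perm (PySem.Set.ofList lista) := by
      rw [List.perm_ext_iff_of_nodup (hlt.imp ne_of_lt) (PySem.Set.nodup_ofList lista)]
      intro z
      rw [hmem z, PySem.Set.mem_ofList lista z, ← PySem.List.mem_sorted lista (fun x => x) false z, hs]
    have hU : PySem.List.sorted (PySem.Set.ofList lista) (fun x => x) false = adjL x s :=
      PySem.List.sorted_eq_of_perm_of_pairwise_lt _ _ (fun x => x) hperm hlt
    have hcount : ∀ e, (x :: s).count e = lista.count e := by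
      intro e
      have := PySem.List.sorted_perm lista (fun x => x) false
      rw [hs] at this
      exact this.count_eq e
    rw [hU]
    refine Prod.ext rfl ?_
    rw [hcnt]
    apply List.map_congr_left
    intro e _
    simp [hcount e]
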